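-- pv_equiv track=rewrite | github.com/Mithra24/Python-Sentiment-Analysis | sentiment_analysis.py | generate_bow
-- ===== SOURCE A (Python) =====
-- def generate_bow(vocab):
--     bag_vector={}
--     for w in vocab:
--         if w in bag_vector:
--             bag_vector[w] += 1
--         else:
--             bag_vector[w] = 1
--     return bag_vector
-- ===== SOURCE B (Python) =====
-- def generate_bow(vocab):
--     items = list(vocab)
--     return {w: items.count(w) for w in dict.fromkeys(items)}
-- ===== Notes on version B (the rewrite author's own statement) =====
-- stated objective: alternative
-- what changed: Replaces A's single accumulating dict-building pass with a two-phase strategy: collect the distinct words (dict.fromkeys), then tally each by scanning the list with list.count.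
import Mathlib
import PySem

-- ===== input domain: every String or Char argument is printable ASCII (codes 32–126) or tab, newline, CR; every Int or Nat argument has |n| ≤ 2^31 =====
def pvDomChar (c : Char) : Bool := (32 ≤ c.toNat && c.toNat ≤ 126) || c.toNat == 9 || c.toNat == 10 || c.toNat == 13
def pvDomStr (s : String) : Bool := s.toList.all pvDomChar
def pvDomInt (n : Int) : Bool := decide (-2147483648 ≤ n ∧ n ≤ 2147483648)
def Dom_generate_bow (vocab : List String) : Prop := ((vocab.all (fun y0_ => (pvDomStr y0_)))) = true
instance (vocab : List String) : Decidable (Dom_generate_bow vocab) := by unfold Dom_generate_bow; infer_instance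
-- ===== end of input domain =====

-- B replaces A's single accumulating dict pass with a two-phase dedup-then-count strategy (alternative decomposition, same results).


-- ===== PORT A =====
-- bag_vector starts empty; 'bag_vector[w] += 1' is insert of getD+1 (exact: the branch guarantees w is present)
def generate_bow (vocab : List String) : List (String × Int) :=
  (vocab.foldl
    (fun bag w =>
      if bag.contains w then bag.insert w (bag.getD w 0 + 1)
      else bag.insert w 1)
    (PySem.Dict.empty : PySem.Dict String Int)).items

-- ===== PORT B =====
-- items = list(vocab); {w: items.count(w) for w in dict.fromkeys(items)}
def generate_bow_alt (vocab : List String) : List (String × Int) :=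
  (PySem.List.dedup vocab).map (fun w => (w, (PySem.List.count vocab w : Int)))

-- ===== PRECONDITION & SPEC =====
def Spec_generate_bow (vocab : List String) (out : List (String × Int)) : Prop := out = generate_bow_alt vocab
instance (vocab : List String) (out : List (String × Int)) : Decidable (Spec_generate_bow vocab out) := by unfold Spec_generate_bow; infer_instance

-- ===== CLAIM (what is proved, stated in full; the proofs are below) =====
def Claim_equal_generate_bow : Prop := ∀ (vocab : List String), Dom_generate_bow vocab → Spec_generate_bow vocab (generate_bow vocab)

-- ===== LEMMAS AND PROOFS =====

-- A's loop body equals the unconditional 'insert w (getD w 0 + 1)': in the else-branch getD is 0.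
theorem generate_bow_step_eq :
    (fun (bag : PySem.Dict String Int) (w : String) =>
      if bag.contains w then bag.insert w (bag.getD w 0 + 1)
      else bag.insert w 1)
    = (fun bag w => bag.insert w (bag.getD w 0 + 1)) := by
  funext bag w
  split_ifs with h
  · rfl
  · rw [PySem.Dict.getD_of_not_contains (d := bag) (k := w) (d0 := 0) (by simpa using h)]; norm_num

-- ===== VERDICT (by name: the statement is the Claim_ definition above) =====
theorem generate_bow_spec : Claim_equal_generate_bow := by
  intro vocab _
  unfold Spec_generate_bow generate_bow generate_bow_alt
  rw [generate_bow_step_eq, PySem.Dict.foldl_insert_getD_add_one_eq_counter,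
    PySem.Dict.items_counter]
  simp [PySem.List.count_eq, PySem.List.dedup_eq_ofList]
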